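-- pv_equiv track=rewrite | github.com/SanyogitaPiya/LLM4TDD-Manual-Vs-Automated | ManualTDD/BVA tests/Odd String Difference.py | odd_string_difference
-- ===== SOURCE A (Python) =====
-- def odd_string_difference(words):
--     def get_difference_array(word):
--         return [ord(word[i+1]) - ord(word[i]) for i in range(len(word) - 1)]
--
--     # Get the difference arrays for each word
--     difference_arrays = [get_difference_array(word) for word in words]
--
--     # Find the difference array that is unique
--     for i in range(len(difference_arrays)):
--         # Count how many times each difference array appears
--         if difference_arrays.count(difference_arrays[i]) == 1:
--             return words[i]
--
--     return None  # Return None if all arrays are the same (though the test case suggests this won't happen)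
-- ===== SOURCE B (Python) =====
-- def odd_string_difference(words):
--     def diff(w):
--         return tuple(ord(b) - ord(a) for a, b in zip(w, w[1:]))
--
--     ds = [diff(w) for w in words]
--     s = sorted(ds)
--     n = len(s)
--     singles = set()
--     for i in range(n):
--         if (i == 0 or s[i - 1] != s[i]) and (i == n - 1 or s[i] != s[i + 1]):
--             singles.add(s[i])
--     for w, d in zip(words, ds):
--         if d in singles:
--             return w
--     return None
-- ===== Notes on version B (the rewrite author's own statement) =====
-- stated objective: faster
-- what changed: B sorts the difference patterns once and reads the unique ones off runs of adjacent equal elements in the sorted list (collected in a set), instead of A's per-word difference_arrays.count inner scan.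
import Mathlib
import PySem

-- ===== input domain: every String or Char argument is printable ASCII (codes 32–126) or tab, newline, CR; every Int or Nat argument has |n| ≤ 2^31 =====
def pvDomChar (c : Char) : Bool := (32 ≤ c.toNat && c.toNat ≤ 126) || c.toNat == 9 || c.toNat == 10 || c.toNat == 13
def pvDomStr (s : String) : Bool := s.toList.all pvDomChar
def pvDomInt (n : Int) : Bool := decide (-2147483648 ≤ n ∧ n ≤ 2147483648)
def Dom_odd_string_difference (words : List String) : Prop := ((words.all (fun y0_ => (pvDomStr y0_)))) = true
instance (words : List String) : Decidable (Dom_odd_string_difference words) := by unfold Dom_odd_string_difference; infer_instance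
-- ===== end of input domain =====

-- B replaces A's per-word difference_arrays.count scan by sorting the patterns once and reading the
-- unique ones off adjacent runs of the sorted list (a different algorithm; same return value).

-- ===== PORT A =====
-- get_difference_array(word); indices i and i+1 are always in range, so pyGetD is exact
def pvDiffArrA (cs : List Char) : List Int :=
  (PySem.List.pyRange 0 ((cs.length : Int) - 1) 1).map
    (fun i => ((PySem.List.pyGetD cs (i + 1) ' ').toNat : Int) - ((PySem.List.pyGetD cs i ' ').toNat : Int))

-- the 'for i in range(len(difference_arrays))' loop: walk words and difference arrays in step
def pvLoopA (das : List (List Int)) : List (String × List Int) → Option String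
  | [] => none
  | (w, d) :: rest => if das.count d = 1 then some w else pvLoopA das rest

def odd_string_difference (words : List String) : Option String :=
  let das := words.map (fun w => pvDiffArrA w.toList)
  pvLoopA das (words.zip das)

-- ===== PORT B =====
-- diff(word) via zip(word, word[1:])
def pvDiffB (cs : List Char) : List Int :=
  (cs.zip (PySem.List.slice cs (some 1) none)).map (fun p => ((p.2.toNat : Int) - (p.1.toNat : Int)))

-- the 'for i in range(n)' scan of the sorted pattern list, collecting runs of length 1
def pvScanSingles (s : List (List Int)) : PySem.Set (List Int) :=
  (PySem.List.pyRange 0 (s.length : Int) 1).foldl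
    (fun acc i =>
      if (i == 0 || !(PySem.List.pyGetD s (i - 1) [] == PySem.List.pyGetD s i []))
          && (i == (s.length : Int) - 1 || !(PySem.List.pyGetD s i [] == PySem.List.pyGetD s (i + 1) []))
      then PySem.Set.add acc (PySem.List.pyGetD s i []) else acc)
    PySem.Set.empty

-- the 'for w, d in zip(words, ds)' loop
def pvLoopB (singles : PySem.Set (List Int)) : List (String × List Int) → Option String
  | [] => none
  | (w, d) :: rest => if PySem.Set.contains singles d then some w else pvLoopB singles rest

def odd_string_difference_alt (words : List String) : Option String :=
  let ds := words.map (fun w => pvDiffB w.toList)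
  let s := PySem.List.sorted ds (fun x => x) false
  pvLoopB (pvScanSingles s) (words.zip ds)

-- ===== PRECONDITION & SPEC =====
def Spec_odd_string_difference (words : List String) (out : Option String) : Prop := out = odd_string_difference_alt words
instance (words : List String) (out : Option String) : Decidable (Spec_odd_string_difference words out) := by unfold Spec_odd_string_difference; infer_instance

-- ===== CLAIM (what is proved, stated in full; the proofs are below) =====
def Claim_equal_odd_string_difference : Prop := ∀ (words : List String), Dom_odd_string_difference words → Spec_odd_string_difference words (odd_string_difference words)

-- ===== LEMMAS AND PROOFS =====

-- the two difference-pattern computations agree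
theorem pvDiff_eq (cs : List Char) : pvDiffB cs = pvDiffArrA cs := by
  unfold pvDiffB pvDiffArrA
  rw [PySem.List.slice_some_none, PySem.List.pyRange_one]
  have hc : PySem.List.clampIdx cs.length 1 = min 1 cs.length := by
    exact_mod_cast PySem.List.clampIdx_natCast cs.length 1
  rw [hc]
  apply List.ext_getElem
  · simp; omega
  · intro k h1 h2
    simp only [List.getElem_map, List.getElem_zip, List.getElem_drop, List.getElem_range]
    have hk : k < cs.length - 1 := by simp at h1; omega
    have e1 : PySem.List.pyGetD cs ((0 : Int) + k + 1) ' ' = cs[k+1] := by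
      rw [show ((0:Int) + k + 1) = ((k+1 : Nat) : Int) by omega]
      rw [PySem.List.pyGetD_natCast]
      exact List.getD_eq_getElem _ _ (by omega)
    have e2 : PySem.List.pyGetD cs ((0 : Int) + k) ' ' = cs[k] := by
      rw [show ((0:Int) + k) = ((k : Nat) : Int) by omega]
      rw [PySem.List.pyGetD_natCast]
      exact List.getD_eq_getElem _ _ (by omega)
    rw [e1, e2]
    have hm : min 1 cs.length + k = k + 1 := by omega
    simp [hm]

-- the default-LT sorted call is the LinearOrder-instance sorted call (Decidable is a subsingleton)
theorem pvSorted_conv (l : List (List Int)) :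
    PySem.List.sorted l (fun x => x) false
      = @PySem.List.sorted (List Int) (List Int) List.instLinearOrder.toLT LinearOrder.toDecidableLT l (fun x => x) false := by
  congr 1

theorem pvSorted_pairwise (l : List (List Int)) :
    (PySem.List.sorted l (fun x => x) false).Pairwise (· ≤ ·) := by
  rw [pvSorted_conv]; exact PySem.List.sorted_pairwise (κ := List Int) l (fun x => x)

theorem pvSorted_perm (l : List (List Int)) :
    (PySem.List.sorted l (fun x => x) false).Perm l := by
  rw [pvSorted_conv]
  exact @PySem.List.sorted_perm (List Int) (List Int) List.instLinearOrder.toLT LinearOrder.toDecidableLT l (fun x => x) false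

-- membership in a conditional fold of Set.add
theorem pvMem_foldl_add_if {α : Type} [BEq α] [LawfulBEq α] (l : List Int) (c : Int → Bool)
    (f : Int → α) (init : PySem.Set α) (y : α) :
    (y ∈ l.foldl (fun acc i => if c i then PySem.Set.add acc (f i) else acc) init)
      ↔ y ∈ init ∨ ∃ i ∈ l, c i = true ∧ f i = y := by
  induction l generalizing init with
  | nil => simp
  | cons a t ih =>
    simp only [List.foldl_cons, List.mem_cons]
    by_cases h : c a = true
    · rw [if_pos h, ih, PySem.Set.mem_add]
      constructor
      · rintro ((hy | rfl) | ⟨i, hi, hci, hfi⟩)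
        · exact Or.inl hy
        · exact Or.inr ⟨a, Or.inl rfl, h, rfl⟩
        · exact Or.inr ⟨i, Or.inr hi, hci, hfi⟩
      · rintro (hy | ⟨i, (rfl | hi), hci, hfi⟩)
        · exact Or.inl (Or.inl hy)
        · exact Or.inl (Or.inr hfi.symm)
        · exact Or.inr ⟨i, hi, hci, hfi⟩
    · rw [if_neg h, ih]
      constructor
      · rintro (hy | ⟨i, hi, hci, hfi⟩)
        · exact Or.inl hy
        · exact Or.inr ⟨i, Or.inr hi, hci, hfi⟩
      · rintro (hy | ⟨i, (rfl | hi), hci, hfi⟩)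
        · exact Or.inl hy
        · exact absurd hci h
        · exact Or.inr ⟨i, hi, hci, hfi⟩

-- in a ≤-sorted list, 'both neighbours differ' at an index of value x is exactly count x = 1
theorem pvSorted_count_one_iff (s : List (List Int)) (hs : s.Pairwise (· ≤ ·)) (x : List Int) :
    s.count x = 1 ↔
      ∃ (k : Nat) (hk : k < s.length), s[k] = x ∧
        (k = 0 ∨ s[k - 1]'(by omega) ≠ x) ∧
        (k = s.length - 1 ∨ ∀ (h1 : k + 1 < s.length), s[k + 1] ≠ x) := by
  have mono : ∀ (i j : Nat) (hi : i < s.length) (hj : j < s.length), i ≤ j → s[i] ≤ s[j] := by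
    intro i j hi hj hij
    rcases Nat.lt_or_eq_of_le hij with h | h
    · exact List.pairwise_iff_getElem.mp hs i j hi hj h
    · subst h; exact le_refl _
  have split : ∀ (k : Nat) (hk : k < s.length),
      s.count x = (s.take k).count x + (s.drop k).count x := by
    intro k hk
    rw [← List.count_append, List.take_append_drop]
  constructor
  · intro hcount
    have hmem : x ∈ s := List.count_pos_iff.mp (by omega)
    obtain ⟨k, hk, hgk⟩ := List.mem_iff_getElem.mp hmem
    refine ⟨k, hk, hgk, ?_, ?_⟩
    · by_cases h0 : k = 0
      · exact Or.inl h0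
      · right
        intro hprev
        -- positions k-1 and k both equal x → count ≥ 2
        have hk1 : k - 1 < s.length := by omega
        have h1 : x ∈ s.take k := by
          rw [List.mem_take_iff_getElem]
          exact ⟨k - 1, by omega, hprev⟩
        have h2 : (s.drop k).count x ≥ 1 := by
          have : x ∈ s.drop k := by
            rw [List.mem_drop_iff_getElem]
            exact ⟨0, by omega, by simpa using hgk⟩
          exact List.count_pos_iff.mpr this
        have h3 : (s.take k).count x ≥ 1 := List.count_pos_iff.mpr h1
        rw [split k hk] at hcount
        omega
    · by_cases hl : k = s.length - 1
      · exact Or.inl hl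
      · right
        intro h1 hnext
        have h2 : x ∈ s.drop (k + 1) := by
          rw [List.mem_drop_iff_getElem]
          exact ⟨0, by omega, by simpa using hnext⟩
        have hdk : s.drop k = s[k] :: s.drop (k + 1) := (List.getElem_cons_drop hk).symm
        have h3 : (s.drop k).count x ≥ 2 := by
          rw [hdk, List.count_cons]
          have := List.count_pos_iff.mpr h2
          simp [hgk]
          omega
        rw [split k hk] at hcount
        omega
  · rintro ⟨k, hk, hgk, hprev, hnext⟩
    rw [split k hk]
    have hdk : s.drop k = s[k] :: s.drop (k + 1) := (List.getElem_cons_drop hk).symm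
    have htake : (s.take k).count x = 0 := by
      rw [List.count_eq_zero]
      intro hmem
      obtain ⟨j, hj, hgj⟩ := List.mem_take_iff_getElem.mp hmem
      have hjk : j < k := by omega
      have hk0 : k ≠ 0 := by omega
      rcases hprev with h | h
      · exact hk0 h
      · -- s[j] = x = s[k] and s[j] ≤ s[k-1] ≤ s[k] force s[k-1] = x
        have l1 : s[j]'(by omega) ≤ s[k - 1]'(by omega) := mono j (k-1) (by omega) (by omega) (by omega)
        have l2 : s[k - 1]'(by omega) ≤ s[k] := mono (k-1) k (by omega) hk (by omega)
        apply h
        have := le_antisymm l2 (hgk ▸ hgj ▸ l1)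
        rw [this, hgk]
    have hdrop : (s.drop (k + 1)).count x = 0 := by
      rw [List.count_eq_zero]
      intro hmem
      obtain ⟨j, hj, hgj⟩ := List.mem_drop_iff_getElem.mp hmem
      have hk1 : k + 1 < s.length := by omega
      have hknl : k ≠ s.length - 1 := by omega
      rcases hnext with h | h
      · exact hknl h
      · have l1 : s[k] ≤ s[k + 1] := mono k (k+1) hk hk1 (by omega)
        have l2 : s[k + 1] ≤ s[k + 1 + j]'(by omega) := mono (k+1) (k+1+j) hk1 (by omega) (by omega)
        apply h hk1
        have := le_antisymm l1 (hgk ▸ hgj ▸ l2)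
        rw [← this, hgk]
    rw [htake, hdk, List.count_cons]
    simp [hgk, hdrop]

-- the run-length-1 scan collects exactly the patterns of count 1
theorem pvScanSingles_mem (s : List (List Int)) (hs : s.Pairwise (· ≤ ·)) (x : List Int) :
    x ∈ pvScanSingles s ↔ s.count x = 1 := by
  unfold pvScanSingles
  rw [pvMem_foldl_add_if, pvSorted_count_one_iff s hs x]
  simp only [PySem.Set.empty]
  constructor
  · rintro (h | ⟨i, hi, hc, hf⟩)
    · simp at h
    · rw [PySem.List.mem_pyRange_one] at hi
      obtain ⟨h0, hn⟩ := hi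
      lift i to Nat using h0 with k
      have hk : k < s.length := by exact_mod_cast hn
      rw [PySem.List.pyGetD_natCast] at hf
      rw [List.getD_eq_getElem _ _ hk] at hf
      simp only [Bool.and_eq_true, Bool.or_eq_true] at hc
      refine ⟨k, hk, hf, ?_, ?_⟩
      · by_cases hk0 : k = 0
        · exact Or.inl hk0
        · right
          intro hx
          rcases hc.1 with h | h
          · simp at h; omega
          · rw [show ((k : Int) - 1) = ((k - 1 : Nat) : Int) by omega,
              PySem.List.pyGetD_natCast, PySem.List.pyGetD_natCast,
              List.getD_eq_getElem _ _ (show k - 1 < s.length by omega),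
              List.getD_eq_getElem _ _ hk] at h
            simp at h
            exact h (by rw [hx, hf])
      · by_cases hkl : k = s.length - 1
        · exact Or.inl hkl
        · right
          intro h1 hx
          rcases hc.2 with h | h
          · simp only [beq_iff_eq] at h
            omega
          · rw [show ((k : Int) + 1) = ((k + 1 : Nat) : Int) by omega,
              PySem.List.pyGetD_natCast, PySem.List.pyGetD_natCast,
              List.getD_eq_getElem _ _ h1, List.getD_eq_getElem _ _ hk] at h
            simp at h
            exact h (by rw [hx, hf])
  · rintro ⟨k, hk, hgk, hprev, hnext⟩
    right
    refine ⟨(k : Int), ?_, ?_, ?_⟩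
    · rw [PySem.List.mem_pyRange_one]
      exact ⟨by omega, by exact_mod_cast hk⟩
    · simp only [Bool.and_eq_true, Bool.or_eq_true]
      refine ⟨?_, ?_⟩
      · by_cases hk0 : k = 0
        · left; simp [hk0]
        · right
          have h : s[k - 1]'(by omega) ≠ x := hprev.resolve_left hk0
          rw [show ((k : Int) - 1) = ((k - 1 : Nat) : Int) by omega,
            PySem.List.pyGetD_natCast, PySem.List.pyGetD_natCast,
            List.getD_eq_getElem _ _ (show k - 1 < s.length by omega),
            List.getD_eq_getElem _ _ hk]
          simpa using fun he => h (he.trans hgk)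
      · by_cases h1 : k + 1 < s.length
        · right
          have h : s[k + 1]'h1 ≠ x := (hnext.resolve_left (by omega)) h1
          rw [show ((k : Int) + 1) = ((k + 1 : Nat) : Int) by omega,
            PySem.List.pyGetD_natCast, PySem.List.pyGetD_natCast,
            List.getD_eq_getElem _ _ h1, List.getD_eq_getElem _ _ hk]
          simpa using fun he => h (he.symm.trans hgk)
        · left
          simp only [beq_iff_eq]
          omega
    · rw [PySem.List.pyGetD_natCast, List.getD_eq_getElem _ _ hk]
      exact hgk

-- the two search loops agree once membership in singles is count = 1
theorem pvLoop_eq (das : List (List Int)) (singles : PySem.Set (List Int))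
    (h : ∀ d, (PySem.Set.contains singles d = true) ↔ das.count d = 1)
    (pairs : List (String × List Int)) :
    pvLoopA das pairs = pvLoopB singles pairs := by
  induction pairs with
  | nil => rfl
  | cons p rest ih =>
    obtain ⟨w, d⟩ := p
    simp only [pvLoopA, pvLoopB]
    by_cases hc : das.count d = 1
    · rw [if_pos hc, if_pos ((h d).mpr hc)]
    · rw [if_neg hc, if_neg (fun hb => hc ((h d).mp hb)), ih]

-- ===== VERDICT (by name: the statement is the Claim_ definition above) =====
theorem odd_string_difference_spec : Claim_equal_odd_string_difference := by
  intro words _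
  unfold Spec_odd_string_difference odd_string_difference odd_string_difference_alt
  simp only [funext fun cs => pvDiff_eq cs]
  apply pvLoop_eq
  intro d
  rw [PySem.Set.contains_iff,
    pvScanSingles_mem _ (pvSorted_pairwise _) d,
    (pvSorted_perm _).count_eq]
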